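-- pv_equiv track=rewrite | github.com/iluvjava/Fucking_LeetCode_ShitLikeThat | HackerRank/problems/Greedy Flourist/solution.py | solution
-- ===== SOURCE A (Python) =====
-- def solution(k, c):
--     c.sort(reverse=True)
--     Groups = []
--     for I in range(0, len(c)//k + 1):
--         Groups.append(c[I*k: min(I*k + k, len(c))])
--     RunningSum = 0
--     for I, G in enumerate(Groups):
--         RunningSum += sum(G)*(I + 1)
--     return RunningSum
-- ===== SOURCE B (Python) =====
-- def solution(k, c):
--     # Different decomposition: instead of weighting elements by chunk rank,
--     # sweep the sorted list BACKWARD maintaining a running suffix sum, and add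
--     # that suffix sum to the total at every chunk boundary (index i with
--     # i % k == 0).  Correct because the total equals the sum over chunk starts
--     # j*k of the suffix sum from j*k: each chunk's sum is counted once per
--     # boundary at or before it, i.e. (rank+1) times.
--     c.sort(reverse=True)
--     suf = 0
--     total = 0
--     for i, x in reversed(list(enumerate(c))):
--         suf += x
--         if i % k == 0:
--             total += suf
--     return total
-- ===== Notes on version B (the rewrite author's own statement) =====
-- stated objective: alternative
-- what changed: A materializes a list of k-sized chunk sublists by slicing and sums each chunk weighted by its rank+1; B never forms chunks or weights: it sweeps the sorted list backward keeping a running suffix sum and adds that suffix sum to the total at each chunk-boundary index i with i % k == 0.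
-- outside the precondition, e.g. on solution(-1, [1, 2]): A returns 0, B returns 4
import Mathlib
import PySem

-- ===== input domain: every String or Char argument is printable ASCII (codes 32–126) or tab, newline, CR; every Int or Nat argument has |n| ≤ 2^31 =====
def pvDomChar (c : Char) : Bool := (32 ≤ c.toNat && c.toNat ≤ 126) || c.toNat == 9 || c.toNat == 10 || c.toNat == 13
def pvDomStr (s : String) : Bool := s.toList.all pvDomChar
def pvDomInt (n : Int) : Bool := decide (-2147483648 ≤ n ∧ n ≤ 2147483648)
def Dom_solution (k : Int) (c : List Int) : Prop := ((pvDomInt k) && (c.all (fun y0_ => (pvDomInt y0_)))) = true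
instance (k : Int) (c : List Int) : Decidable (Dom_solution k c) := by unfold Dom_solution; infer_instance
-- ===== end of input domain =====

-- B replaces A's materialized list of chunk sublists (summed with rank weights) by a
-- single backward sweep with a running suffix sum, added at each chunk-boundary index
-- (objective: alternative). Both A and B sort c in place; the equivalence proved here
-- is about the return value (the mutation is identical).

-- ===== PORT A =====
def solution (k : Int) (c : List Int) : Int :=
  let s := PySem.List.sorted c (fun x => x) true
  let groups := (PySem.List.pyRange 0 (PySem.Int.floordiv (s.length : Int) k + 1) 1).foldl
      (fun g I => g ++ [PySem.List.slice s (some (I * k)) (some (min (I * k + k) (s.length : Int)))])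
      ([] : List (List Int))
  (PySem.List.enumerate groups 0).foldl (fun acc p => acc + p.2.sum * (p.1 + 1)) 0

-- ===== PORT B =====
def solution_alt (k : Int) (c : List Int) : Int :=
  let s := PySem.List.sorted c (fun x => x) true
  let r := ((PySem.List.enumerate s 0).reverse).foldl
      (fun st p =>
        let suf := st.1 + p.2
        (suf, if PySem.Int.mod p.1 k == 0 then st.2 + suf else st.2))
      ((0 : Int), (0 : Int))
  r.2

-- ===== PRECONDITION & SPEC =====
-- Pre_ excludes k = 0 (A raises ZeroDivisionError there) and k < 0, where A's
-- range(0, len(c)//k + 1) is accidentally empty so A returns 0 — a negative chunk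
-- size is outside the natural domain of the task.
def Pre_solution (k : Int) (c : List Int) : Prop := 1 ≤ k
instance (k : Int) (c : List Int) : Decidable (Pre_solution k c) := by unfold Pre_solution; infer_instance
def pvWitness_solution : Int × List Int := (2, [1, 5, 3])
def Spec_solution (k : Int) (c : List Int) (out : Int) : Prop := out = solution_alt k c
instance (k : Int) (c : List Int) (out : Int) : Decidable (Spec_solution k c out) := by unfold Spec_solution; infer_instance

-- ===== CLAIM (what is proved, stated in full; the proofs are below) =====
def Claim_equal_solution : Prop := ∀ (k : Int) (c : List Int), Dom_solution k c → Pre_solution k c → Spec_solution k c (solution k c)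

-- ===== LEMMAS AND PROOFS =====

-- The common value: sum of suffix-sums dropped κ'+1 at a time.
def chunkSum (κ' : Nat) (s : List Int) : Int :=
  if h : s = [] then 0 else s.sum + chunkSum κ' (s.drop (κ' + 1))
termination_by s.length
decreasing_by
  have : 0 < s.length := List.length_pos_iff.mpr h
  simp [List.length_drop]; omega

-- B's backward sweep in foldr form: state = (running suffix sum, total)
def B2 (κ : Nat) (m : Int) (s : List Int) (st : Int × Int) : Int × Int :=
  (PySem.List.enumerate s m).foldr
    (fun p st =>
      let suf := st.1 + p.2
      (suf, if PySem.Int.mod p.1 (κ : Int) == 0 then st.2 + suf else st.2)) st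

-- A's weighted enumerate-sum over a list of groups, start index m
def WA (m : Int) (gs : List (List Int)) : Int :=
  ((PySem.List.enumerate gs m).map (fun p => p.2.sum * (p.1 + 1))).sum

-- A's group list in drop/take form
def gl (κ q : Nat) (s : List Int) : List (List Int) :=
  (List.range (q + 1)).map (fun I => (s.drop (I * κ)).take κ)

theorem B2_cons (κ : Nat) (m : Int) (x : Int) (t : List Int) (st : Int × Int) :
    B2 κ m (x :: t) st =
      let inner := B2 κ (m + 1) t st
      ((inner.1 + x), if PySem.Int.mod m (κ : Int) == 0 then inner.2 + (inner.1 + x) else inner.2) := by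
  simp [B2, PySem.List.enumerate_cons]

theorem B2_append (κ : Nat) (m : Int) (a b : List Int) (st : Int × Int) :
    B2 κ m (a ++ b) st = B2 κ m a (B2 κ (m + a.length) b st) := by
  simp [B2, PySem.List.enumerate_append, List.foldr_append]

theorem B2_fst (κ : Nat) (s : List Int) : ∀ (m : Int) (st : Int × Int),
    (B2 κ m s st).1 = st.1 + s.sum := by
  induction s with
  | nil => intro m st; simp [B2]
  | cons x t ih => intro m st; rw [B2_cons]; simp [ih]; ring

theorem B2_shift (κ : Nat) (s : List Int) : ∀ (m : Int) (st : Int × Int),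
    B2 κ (m + (κ : Int)) s st = B2 κ m s st := by
  induction s with
  | nil => intro m st; simp [B2]
  | cons x t ih =>
      intro m st
      rw [B2_cons, B2_cons]
      have h1 : m + (κ : Int) + 1 = (m + 1) + (κ : Int) := by ring
      rw [h1, ih]
      have h2 : PySem.Int.mod (m + (κ : Int)) (κ : Int) = PySem.Int.mod m (κ : Int) := by
        by_cases hκ : (0:Int) < (κ : Int)
        · rw [PySem.Int.mod_eq_emod_of_pos hκ, PySem.Int.mod_eq_emod_of_pos hκ,
            show m + (κ:Int) = m + (κ:Int) * 1 from by ring, Int.add_mul_emod_self_left]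
        · have h0 : (κ : Int) = 0 := by omega
          simp [h0]
      rw [h2]

-- interior of a block: no index in [m, m+len) hits a boundary when 1 ≤ m, m+len ≤ κ
theorem B2_interior (κ : Nat) (s : List Int) : ∀ (m : Int) (st : Int × Int),
    1 ≤ m → m + s.length ≤ (κ : Int) → (B2 κ m s st).2 = st.2 := by
  induction s with
  | nil => intro m st _ _; simp [B2]
  | cons x t ih =>
      intro m st hm hle
      rw [B2_cons]
      have hb : (0:Int) < (κ : Int) := by simp at hle; omega
      have hmod : PySem.Int.mod m (κ : Int) = m := by
        rw [PySem.Int.mod_eq_emod_of_pos hb]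
        apply Int.emod_eq_of_lt (by omega)
        simp at hle; omega
      simp only [hmod]
      have hne : (m == (0:Int)) = false := by simp; omega
      simp only [hne]
      have := ih (m + 1) st (by omega) (by simp at hle ⊢; omega)
      simpa using this

-- a nonempty block starting at index 0, length ≤ κ: only index 0 qualifies
theorem B2_block (κ : Nat) (x : Int) (t : List Int) (st : Int × Int)
    (hle : (x :: t).length ≤ κ) :
    (B2 κ 0 (x :: t) st).2 = st.2 + st.1 + (x :: t).sum := by
  rw [B2_cons]
  have h0 : PySem.Int.mod 0 (κ : Int) = 0 := by
    simp [PySem.Int.mod]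
  simp only [h0, zero_add]
  have hint : (B2 κ 1 t st).2 = st.2 := by
    apply B2_interior κ t 1 st (by omega)
    simp at hle ⊢; omega
  have hfst : (B2 κ 1 t st).1 = st.1 + t.sum := B2_fst κ t 1 st
  simp [hint, hfst]
  ring

theorem chunkSum_nil (κ' : Nat) : chunkSum κ' ([] : List Int) = 0 := by
  rw [chunkSum]; simp

theorem B2_chunk (κ' : Nat) (s : List Int) : (B2 (κ' + 1) 0 s (0, 0)).2 = chunkSum κ' s := by
  induction hn : s.length using Nat.strong_induction_on generalizing s with
  | _ n ih =>
    by_cases hs : s = []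
    · subst hs; simp [B2, chunkSum]
    · have hpos : 0 < κ' + 1 := Nat.succ_pos κ'
      have hsplit : s.take (κ' + 1) ++ s.drop (κ' + 1) = s := List.take_append_drop (κ' + 1) s
      by_cases hle : s.length ≤ κ' + 1
      · have hdrop : s.drop (κ' + 1) = [] := List.drop_eq_nil_of_le hle
        obtain ⟨x, t, hxt⟩ := List.exists_cons_of_ne_nil hs
        subst hxt
        rw [B2_block (κ' + 1) x t (0,0) hle, chunkSum, dif_neg hs, hdrop, chunkSum_nil]
        ring
      · have hlt : κ' + 1 < s.length := by omega
        have htl : (s.take (κ' + 1)).length = κ' + 1 := by simp; omega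
        have happ : B2 (κ' + 1) 0 s (0,0)
            = B2 (κ' + 1) 0 (s.take (κ' + 1)) (B2 (κ' + 1) (0 + ((s.take (κ' + 1)).length : Int)) (s.drop (κ' + 1)) (0,0)) := by
          conv_lhs => rw [← hsplit]
          exact B2_append (κ' + 1) 0 (s.take (κ' + 1)) (s.drop (κ' + 1)) (0,0)
        rw [happ, htl]
        have hsh : B2 (κ' + 1) ((0:Int) + ((κ' + 1 : Nat) : Int)) (s.drop (κ' + 1)) (0,0)
            = B2 (κ' + 1) 0 (s.drop (κ' + 1)) (0,0) := by
          have := B2_shift (κ' + 1) (s.drop (κ' + 1)) 0 (0,0)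
          simpa using this
        simp only [zero_add] at hsh ⊢
        rw [hsh]
        have hifst : (B2 (κ' + 1) 0 (s.drop (κ' + 1)) ((0:Int),(0:Int))).1 = (s.drop (κ' + 1)).sum := by
          have := B2_fst (κ' + 1) (s.drop (κ' + 1)) 0 (0,0); simpa using this
        have hisnd : (B2 (κ' + 1) 0 (s.drop (κ' + 1)) ((0:Int),(0:Int))).2 = chunkSum κ' (s.drop (κ' + 1)) :=
          ih (s.drop (κ' + 1)).length (by simp; omega) (s.drop (κ' + 1)) rfl
        obtain ⟨x, t, hxt⟩ := List.exists_cons_of_ne_nil (l := s.take (κ' + 1))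
          (by intro h; rw [h] at htl; simp at htl)
        rw [hxt, B2_block (κ' + 1) x t _ (by rw [← hxt, htl])]
        rw [← hxt, hifst, hisnd]
        have hrhs : chunkSum κ' s = s.sum + chunkSum κ' (s.drop (κ' + 1)) := by
          rw [chunkSum, dif_neg hs]
        rw [hrhs]
        have hsum : (s.take (κ' + 1)).sum + (s.drop (κ' + 1)).sum = s.sum := by
          rw [← List.sum_append, hsplit]
        omega

theorem WA_cons (m : Int) (g : List Int) (gs : List (List Int)) :
    WA m (g :: gs) = g.sum * (m + 1) + WA (m + 1) gs := by
  simp [WA, PySem.List.enumerate_cons]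

theorem WA_shift (gs : List (List Int)) :
    ∀ m, WA (m + 1) gs = WA m gs + (gs.map List.sum).sum := by
  induction gs with
  | nil => intro m; simp [WA]
  | cons g t ih =>
      intro m
      rw [WA_cons, WA_cons, ih (m + 1)]
      simp; ring

theorem gl_succ (κ q : Nat) (s : List Int) :
    gl κ (q + 1) s = s.take κ :: gl κ q (s.drop κ) := by
  unfold gl
  rw [List.range_succ_eq_map]
  simp only [List.map_cons, List.map_map]
  congr 1
  · simp
  · apply List.map_congr_left
    intro I _
    simp only [Function.comp, List.drop_drop]
    congr 2
    simp only [Nat.succ_mul]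
    omega

theorem gl_sum (κ' : Nat) : ∀ (q : Nat) (s : List Int), s.length ≤ (q + 1) * (κ' + 1) →
    ((gl (κ' + 1) q s).map List.sum).sum = s.sum := by
  intro q
  induction q with
  | zero =>
      intro s h
      simp at h
      simp [gl, List.range_one, List.take_of_length_le h]
  | succ q ih =>
      intro s h
      rw [gl_succ]
      simp only [List.map_cons, List.sum_cons]
      have hexp : (q + 1 + 1) * (κ' + 1) = (q + 1) * (κ' + 1) + (κ' + 1) := by ring
      rw [ih (s.drop (κ' + 1)) (by simp; omega)]
      rw [← List.sum_append, List.take_append_drop]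

theorem WA_chunk (κ' : Nat) : ∀ (q : Nat) (s : List Int), s.length ≤ (q + 1) * (κ' + 1) →
    WA 0 (gl (κ' + 1) q s) = chunkSum κ' s := by
  intro q
  induction q with
  | zero =>
      intro s h
      simp at h
      have htake : s.take (κ' + 1) = s := List.take_of_length_le h
      have hdrop : s.drop (κ' + 1) = [] := List.drop_eq_nil_of_le h
      rw [chunkSum]
      by_cases hs : s = []
      · subst hs; simp [gl, List.range_one, WA, PySem.List.enumerate_cons]
      · rw [dif_neg hs]
        simp [gl, List.range_one, WA, PySem.List.enumerate_cons, htake, hdrop, chunkSum]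
  | succ q ih =>
      intro s h
      rw [gl_succ, WA_cons]
      rw [WA_shift (gl (κ' + 1) q (s.drop (κ' + 1))) 0]
      have hexp : (q + 1 + 1) * (κ' + 1) = (q + 1) * (κ' + 1) + (κ' + 1) := by ring
      rw [ih (s.drop (κ' + 1)) (by simp; omega)]
      rw [gl_sum κ' q (s.drop (κ' + 1)) (by simp; omega)]
      by_cases hs : s = []
      · subst hs; simp [chunkSum]
      · have hrhs : chunkSum κ' s = s.sum + chunkSum κ' (s.drop (κ' + 1)) := by
          rw [chunkSum, dif_neg hs]
        rw [hrhs]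
        have hsum : (s.take (κ' + 1)).sum + (s.drop (κ' + 1)).sum = s.sum := by
          rw [← List.sum_append, List.take_append_drop]
        omega

-- A's slice of the I-th chunk equals drop/take
theorem slice_chunk (κ : Nat) (hκ : 0 < κ) (s : List Int) (I : Nat) :
    PySem.List.slice s (some ((I : Int) * (κ : Int)))
      (some (min ((I : Int) * (κ : Int) + (κ : Int)) (s.length : Int)))
    = (s.drop (I * κ)).take κ := by
  have h1 : (I : Int) * (κ : Int) = ((I * κ : Nat) : Int) := by push_cast; ring
  have h2 : min (((I * κ : Nat) : Int) + (κ : Int)) (s.length : Int)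
      = ((min (I * κ + κ) s.length : Nat) : Int) := by push_cast; omega
  rw [h1, h2, PySem.List.slice_natCast]
  by_cases hle : s.length ≤ I * κ
  · have : s.drop (I * κ) = [] := List.drop_eq_nil_of_le hle
    simp [this]
  · have hlen : (s.drop (I * κ)).length = s.length - I * κ := by simp
    by_cases hk : κ ≤ s.length - I * κ
    · congr 1; omega
    · have hmin : min (I * κ + κ) s.length - I * κ = s.length - I * κ := by omega
      rw [hmin, ← hlen, List.take_length]
      exact (List.take_of_length_le (by omega)).symm

-- ===== VERDICT (by name: the statement is the Claim_ definition above) =====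
theorem solution_spec : Claim_equal_solution := by
  intro k c _ hpre
  unfold Spec_solution
  obtain ⟨κ', hκ⟩ : ∃ κ', k = ((κ' + 1 : Nat) : Int) := by
    refine ⟨k.toNat - 1, ?_⟩
    have : 1 ≤ k := hpre
    omega
  subst hκ
  simp only [solution, solution_alt]
  set s := PySem.List.sorted c (fun x => x) true with hs
  have hpos : 0 < κ' + 1 := Nat.succ_pos κ'
  have hbound : s.length ≤ (s.length / (κ' + 1) + 1) * (κ' + 1) := by
    have h1 := Nat.div_add_mod s.length (κ' + 1)
    have h2 := Nat.mod_lt s.length hpos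
    have hexp : (s.length / (κ' + 1) + 1) * (κ' + 1)
        = (κ' + 1) * (s.length / (κ' + 1)) + (κ' + 1) := by ring
    omega
  have hgroups : (PySem.List.pyRange 0 (PySem.Int.floordiv (s.length : Int) ((κ' + 1 : Nat) : Int) + 1) 1).foldl
      (fun g I => g ++ [PySem.List.slice s (some (I * ((κ' + 1 : Nat) : Int)))
        (some (min (I * ((κ' + 1 : Nat) : Int) + ((κ' + 1 : Nat) : Int)) (s.length : Int)))])
      ([] : List (List Int))
      = gl (κ' + 1) (s.length / (κ' + 1)) s := by
    rw [PySem.List.foldl_append_singleton_eq_map, PySem.Int.floordiv_natCast]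
    rw [show ((s.length / (κ' + 1) : Nat) : Int) + 1 = ((s.length / (κ' + 1) + 1 : Nat) : Int) from by push_cast; ring]
    rw [PySem.List.pyRange_zero_natCast, List.nil_append, List.map_map]
    unfold gl
    apply List.map_congr_left
    intro I _
    exact slice_chunk (κ' + 1) hpos s I
  rw [hgroups, PySem.List.foldl_add]
  simp only [zero_add]
  have hA := WA_chunk κ' (s.length / (κ' + 1)) s hbound
  unfold WA at hA
  rw [hA]
  have hB := B2_chunk κ' s
  rw [List.foldl_reverse]
  exact hB.symm
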